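-- pv_equiv track=rewrite | github.com/Aquaird/detection | model/tools.py | sample_convertor
-- ===== SOURCE A (Python) =====
-- def sample_convertor(sample, tau):
--     converted_sample = []
--     temp = ''
--     for idx, value in enumerate(sample):
--         current_pos_val = 1 if sample[idx] >= tau else 0
--         if temp == '':
--             temp = str(current_pos_val)
--         elif int(temp[-1]) == current_pos_val:
--             temp += str(current_pos_val)
--         else:
--             converted_sample.append(temp)
--             temp = str(current_pos_val)
--     converted_sample.append(temp)
--     return converted_sample
-- ===== SOURCE B (Python) =====
-- def sample_convertor(sample, tau):
--     # Run-length encode the thresholded bit sequence, one whole run at a time.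
--     # On empty input this returns [] (no runs), where A returns [''].
--     bits = ['1' if v >= tau else '0' for v in sample]
--     n = len(bits)
--     out = []
--     i = 0
--     while i < n:
--         j = i + 1
--         while j < n and bits[j] == bits[i]:
--             j += 1
--         out.append(bits[i] * (j - i))
--         i = j
--     return out
-- ===== Notes on version B (the rewrite author's own statement) =====
-- stated objective: simpler
-- what changed: B maps the input once to threshold bits and run-length groups them by recursion on whole runs (measure the run, emit key*length, recurse on the rest), instead of A's character-by-character fold that grows a temp string and compares int(temp[-1]) against each new bit; on empty input B naturally returns [] instead of A's accidental [''].
-- intended difference: On the empty list A returns [''] (the leftover empty temp string is appended unconditionally), while B returns [], the intended run list of an empty sample. — e.g. on sample_convertor([], 0): A returns [""], B returns []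
import Mathlib
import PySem

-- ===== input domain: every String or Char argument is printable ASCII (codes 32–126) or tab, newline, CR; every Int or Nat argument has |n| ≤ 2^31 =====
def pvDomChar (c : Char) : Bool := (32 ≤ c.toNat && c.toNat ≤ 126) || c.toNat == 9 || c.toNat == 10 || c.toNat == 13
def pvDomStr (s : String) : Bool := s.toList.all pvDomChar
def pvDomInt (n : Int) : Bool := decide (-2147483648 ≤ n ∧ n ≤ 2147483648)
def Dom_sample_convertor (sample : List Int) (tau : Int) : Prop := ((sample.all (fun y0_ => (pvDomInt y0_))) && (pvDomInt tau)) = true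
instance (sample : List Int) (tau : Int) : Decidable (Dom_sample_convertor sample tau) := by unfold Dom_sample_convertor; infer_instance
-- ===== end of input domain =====

-- B run-length groups the thresholded bit list by recursion on whole runs instead of A's
-- char-by-char temp-string fold (objective: simpler); on empty input B returns [] where A
-- returns [''] — stated as the intended difference D_ below.


-- ===== PORT A =====
-- temp (a Python str built from '0'/'1') is carried as its List Char; sample[idx] is the
-- enumerated value p.2 (= sample[idx] for every enumerate index). pvStepA is A's loop body.
def pvStepA (tau : Int) (st : List String × List Char) (p : Int × Int) :
    List String × List Char :=
  let converted := st.1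
  let temp := st.2
  let current_pos_val : Int := if p.2 >= tau then 1 else 0
  if temp = [] then
    (converted, PySem.Int.toChars current_pos_val)
  else if (PySem.List.pyGet? temp (-1)).bind (fun c => PySem.Int.ofChars? [c])
          = some current_pos_val then
    (converted, temp ++ PySem.Int.toChars current_pos_val)
  else
    (converted ++ [String.mk temp], PySem.Int.toChars current_pos_val)

def sample_convertor (sample : List Int) (tau : Int) : List String :=
  let st := (PySem.List.enumerate sample).foldl (pvStepA tau) ([], [])
  st.1 ++ [String.mk st.2]

-- ===== PORT B =====
def pvBit (v tau : Int) : Char := if v ≥ tau then '1' else '0'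

-- inner while loop of Source B: advance j while j < n and bits[j] == k (k = bits[i]);
-- bits.getD j ' ' is exact for bits[j] since the loop only reads j < bits.length
def pvRunEnd (bits : List Char) (k : Char) (j : Nat) : Nat :=
  if h : j < bits.length ∧ bits.getD j ' ' = k then pvRunEnd bits k (j + 1) else j
termination_by bits.length - j
decreasing_by omega

theorem pvRunEnd_ge (bits : List Char) (k : Char) (j : Nat) : j ≤ pvRunEnd bits k j := by
  fun_induction pvRunEnd bits k j with
  | case1 j h ih => omega
  | case2 j h => omega

-- outer while loop of Source B over i, appending one run string per iteration
def pvLoop (bits : List Char) (i : Nat) (out : List String) : List String :=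
  if h : i < bits.length then
    let j := pvRunEnd bits (bits.getD i ' ') (i + 1)
    pvLoop bits j (out ++ [String.mk (List.replicate (j - i) (bits.getD i ' '))])
  else out
termination_by bits.length - i
decreasing_by
  have := pvRunEnd_ge bits (bits.getD i ' ') (i + 1)
  omega

def sample_convertor_alt (sample : List Int) (tau : Int) : List String :=
  pvLoop (sample.map (fun v => pvBit v tau)) 0 []

-- ===== PRECONDITION & SPEC =====
-- On the empty list A returns [''] (the leftover empty temp string is appended
-- unconditionally), while B returns [], the intended run list of an empty sample.
def D_sample_convertor (sample : List Int) (tau : Int) : Prop := sample = []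
instance (sample : List Int) (tau : Int) : Decidable (D_sample_convertor sample tau) := by
  unfold D_sample_convertor; infer_instance

def Spec_sample_convertor (sample : List Int) (tau : Int) (out : List String) : Prop :=
  ¬ D_sample_convertor sample tau → out = sample_convertor_alt sample tau
instance (sample : List Int) (tau : Int) (out : List String) :
    Decidable (Spec_sample_convertor sample tau out) := by
  unfold Spec_sample_convertor; infer_instance

def pvDiffWitness_sample_convertor : List Int × Int := ([], 0)
def pvDiffWitnessOut_sample_convertor : (List String) × (List String) := ([""], [])

-- ===== CLAIM (what is proved, stated in full; the proofs are below) =====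
def Claim_unchanged_sample_convertor : Prop := ∀ (sample : List Int) (tau : Int), Dom_sample_convertor sample tau → Spec_sample_convertor sample tau (sample_convertor sample tau)
def Claim_changed_sample_convertor : Prop := Dom_sample_convertor (pvDiffWitness_sample_convertor.1) (pvDiffWitness_sample_convertor.2) ∧ D_sample_convertor (pvDiffWitness_sample_convertor.1) (pvDiffWitness_sample_convertor.2) ∧ sample_convertor (pvDiffWitness_sample_convertor.1) (pvDiffWitness_sample_convertor.2) = pvDiffWitnessOut_sample_convertor.1 ∧ sample_convertor_alt (pvDiffWitness_sample_convertor.1) (pvDiffWitness_sample_convertor.2) = pvDiffWitnessOut_sample_convertor.2 ∧ pvDiffWitnessOut_sample_convertor.1 ≠ pvDiffWitnessOut_sample_convertor.2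
def Claim_exact_sample_convertor : Prop := ∀ (sample : List Int) (tau : Int), Dom_sample_convertor sample tau → D_sample_convertor sample tau → sample_convertor sample tau ≠ sample_convertor_alt sample tau

-- ===== LEMMAS AND PROOFS =====

-- run length / run list of a bit string (proof-side reference)
def pvRunLen (k : Char) : List Char → Nat
  | [] => 0
  | c :: cs => if c = k then pvRunLen k cs + 1 else 0

def pvRuns : List Char → List String
  | [] => []
  | k :: rest =>
    let m := pvRunLen k rest
    String.mk (List.replicate (m + 1) k) :: pvRuns (rest.drop m)
termination_by bs => bs.length
decreasing_by
  simp only [List.length_drop, List.length_cons]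
  omega

-- Source B's loops compute pvRuns
theorem pvRunEnd_eq (bits : List Char) (k : Char) (j : Nat) :
    pvRunEnd bits k j = j + pvRunLen k (bits.drop j) := by
  fun_induction pvRunEnd bits k j with
  | case1 j h ih =>
    obtain ⟨hj, hk⟩ := h
    have hdrop : bits.drop j = bits.getD j ' ' :: bits.drop (j + 1) := by
      rw [List.getD_eq_getElem _ _ hj, List.drop_eq_getElem_cons hj]
    rw [ih, hdrop, hk, pvRunLen, if_pos rfl]
    omega
  | case2 j h =>
    by_cases hj : j < bits.length
    · have hk : ¬ bits.getD j ' ' = k := fun hk => h ⟨hj, hk⟩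
      have hdrop : bits.drop j = bits.getD j ' ' :: bits.drop (j + 1) := by
        rw [List.getD_eq_getElem _ _ hj, List.drop_eq_getElem_cons hj]
      rw [hdrop, pvRunLen, if_neg hk]
      omega
    · rw [List.drop_eq_nil_of_le (by omega)]
      simp [pvRunLen]

theorem pvLoop_eq (bits : List Char) (i : Nat) (out : List String) :
    pvLoop bits i out = out ++ pvRuns (bits.drop i) := by
  fun_induction pvLoop bits i out with
  | case1 i out h j ih =>
    have hj : j = (i + 1) + pvRunLen (bits.getD i ' ') (bits.drop (i + 1)) :=
      pvRunEnd_eq bits (bits.getD i ' ') (i + 1)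
    have hdrop : bits.drop i = bits.getD i ' ' :: bits.drop (i + 1) := by
      rw [List.getD_eq_getElem _ _ h, List.drop_eq_getElem_cons h]
    rw [ih, hdrop, pvRuns]
    have hm : j - i = pvRunLen (bits.getD i ' ') (bits.drop (i + 1)) + 1 := by omega
    have hadd : (i + 1) + pvRunLen (bits.getD i ' ') (bits.drop (i + 1)) = j := by omega
    have hdj : bits.drop j
        = (bits.drop (i + 1)).drop (pvRunLen (bits.getD i ' ') (bits.drop (i + 1))) := by
      rw [List.drop_drop, hadd]
    simp [hm, hdj, List.append_assoc]
  | case2 i out h =>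
    have hnil : bits.drop i = [] := List.drop_eq_nil_of_le (by omega)
    simp [hnil, pvRuns]

theorem alt_eq_pvRuns (sample : List Int) (tau : Int) :
    sample_convertor_alt sample tau = pvRuns (sample.map (fun v => pvBit v tau)) := by
  rw [sample_convertor_alt, pvLoop_eq]
  simp

-- reference run-builder: current run key k repeated n times, then the rest of the bits
def pvG (k : Char) (n : Nat) : List Char → List String
  | [] => [String.mk (List.replicate n k)]
  | c :: cs =>
    if c = k then pvG k (n + 1) cs
    else String.mk (List.replicate n k) :: pvG c 1 cs

theorem pvBit_cases (v tau : Int) : pvBit v tau = '0' ∨ pvBit v tau = '1' := by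
  unfold pvBit; split <;> simp

theorem toChars_bit (v tau : Int) :
    PySem.Int.toChars (if v ≥ tau then (1 : Int) else 0) = [pvBit v tau] := by
  unfold pvBit; split <;> decide

theorem ofChars_bit (k : Char) (hk : k = '0' ∨ k = '1') (v tau : Int) :
    ((PySem.Int.ofChars? [k]) = some (if v ≥ tau then (1 : Int) else 0))
      ↔ pvBit v tau = k := by
  unfold pvBit
  rcases hk with h | h <;> subst h <;> split <;> simp <;> decide

-- A's loop, once temp is a nonempty run replicate (n+1) k of a bit char k
theorem foldA_run (tau : Int) (l : List (Int × Int)) :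
    ∀ (acc : List String) (k : Char) (n : Nat), (k = '0' ∨ k = '1') →
    (l.foldl (pvStepA tau) (acc, List.replicate (n + 1) k)).1
      ++ [String.mk (l.foldl (pvStepA tau) (acc, List.replicate (n + 1) k)).2]
      = acc ++ pvG k (n + 1) (l.map (fun p => pvBit p.2 tau)) := by
  induction l with
  | nil => intro acc k n _; simp [pvG]
  | cons p l ih =>
    intro acc k n hk
    simp only [List.foldl_cons, List.map_cons]
    have htempne : List.replicate (n + 1) k ≠ [] := by simp
    have hlast : PySem.List.pyGet? (List.replicate (n + 1) k) (-1) = some k := by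
      rw [PySem.List.pyGet?_neg_one]
      simp [List.getLast?_replicate]
    by_cases hbit : pvBit p.2 tau = k
    · have hcond : (PySem.List.pyGet? (List.replicate (n + 1) k) (-1)).bind
          (fun c => PySem.Int.ofChars? [c]) = some (if p.2 ≥ tau then (1 : Int) else 0) := by
        rw [hlast]; simpa using (ofChars_bit k hk p.2 tau).mpr hbit
      have hstep : pvStepA tau (acc, List.replicate (n + 1) k) p
          = (acc, List.replicate (n + 1 + 1) k) := by
        simp only [pvStepA, toChars_bit]
        rw [if_neg htempne, if_pos hcond, hbit, ← List.replicate_succ']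
      rw [hstep, ih acc k (n + 1) hk]
      simp [pvG, hbit]
    · have hcond : ¬ ((PySem.List.pyGet? (List.replicate (n + 1) k) (-1)).bind
          (fun c => PySem.Int.ofChars? [c]) = some (if p.2 ≥ tau then (1 : Int) else 0)) := by
        rw [hlast]
        intro h
        exact hbit ((ofChars_bit k hk p.2 tau).mp (by simpa using h))
      have hstep : pvStepA tau (acc, List.replicate (n + 1) k) p
          = (acc ++ [String.mk (List.replicate (n + 1) k)],
             List.replicate (0 + 1) (pvBit p.2 tau)) := by
        simp only [pvStepA, toChars_bit]
        rw [if_neg htempne, if_neg hcond]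
        simp
      rw [hstep, ih (acc ++ [String.mk (List.replicate (n + 1) k)]) (pvBit p.2 tau) 0
            (pvBit_cases p.2 tau)]
      simp [pvG, hbit, List.append_assoc]

-- B's runs agree with the reference builder
theorem pvG_eq_runs (cs : List Char) : ∀ (k : Char) (n : Nat),
    pvG k n cs
      = String.mk (List.replicate (n + pvRunLen k cs) k)
          :: pvRuns (cs.drop (pvRunLen k cs)) := by
  induction cs with
  | nil => intro k n; simp [pvG, pvRunLen, pvRuns]
  | cons c cs ih =>
    intro k n
    by_cases h : c = k
    · subst h
      simp only [pvG, pvRunLen]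
      rw [ih c (n + 1)]
      have : n + 1 + pvRunLen c cs = n + (pvRunLen c cs + 1) := by omega
      rw [this]
      simp
    · simp only [pvG, pvRunLen, if_neg h]
      rw [ih c 1]
      simp only [List.drop_zero]
      rw [pvRuns]
      have h1 : pvRunLen c cs + 1 = 1 + pvRunLen c cs := by omega
      rw [h1]
      simp

theorem pvRuns_eq_pvG (c : Char) (cs : List Char) : pvRuns (c :: cs) = pvG c 1 cs := by
  rw [pvRuns, pvG_eq_runs cs c 1]
  have : pvRunLen c cs + 1 = 1 + pvRunLen c cs := by omega
  rw [this]

theorem map_snd_enum (tau : Int) (vs : List Int) (s : Int) :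
    (PySem.List.enumerate vs s).map (fun p => pvBit p.2 tau)
      = vs.map (fun v => pvBit v tau) := by
  induction vs generalizing s with
  | nil => simp [PySem.List.enumerate_nil]
  | cons v vs ih => simp [PySem.List.enumerate_cons, ih]

-- ===== VERDICT (by name: the statement is the Claim_ definition above) =====
theorem sample_convertor_spec : Claim_unchanged_sample_convertor := by
  intro sample tau _ hD
  unfold D_sample_convertor at hD
  match sample with
  | [] => exact absurd rfl hD
  | v :: vs =>
    rw [alt_eq_pvRuns]
    unfold sample_convertor
    simp only [PySem.List.enumerate, List.foldl_cons, zero_add]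
    have hstep : pvStepA tau ([], []) (0, v) = ([], List.replicate (0 + 1) (pvBit v tau)) := by
      simp [pvStepA, toChars_bit]
    rw [hstep, foldA_run tau (PySem.List.enumerate vs 1) [] (pvBit v tau) 0
          (pvBit_cases v tau)]
    rw [map_snd_enum tau vs 1]
    simp only [List.map_cons, pvRuns_eq_pvG, List.nil_append]

theorem sample_convertor_changed : Claim_changed_sample_convertor := by
  unfold Claim_changed_sample_convertor
  refine ⟨by decide, rfl, by decide, ?_, by decide⟩
  simp [pvDiffWitness_sample_convertor, pvDiffWitnessOut_sample_convertor,
    sample_convertor_alt, pvLoop]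

theorem sample_convertor_tight : Claim_exact_sample_convertor := by
  intro sample tau _ hD
  unfold D_sample_convertor at hD
  subst hD
  simp [sample_convertor, sample_convertor_alt, pvLoop, PySem.List.enumerate]
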